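-- pv_equiv track=rewrite | github.com/JeangyuHeo/Algorithm | Heap/프로그래머스_더맵게.py | solution
-- ===== SOURCE A (Python) =====
-- import heapq
--
-- def solution(scoville, K):
--     answer = 0
--     h=[]
--
--     for scov in scoville:
--         heapq.heappush(h, scov)
--
--     while (h[0] < K and len(h) > 1):
--         first = heapq.heappop(h)
--         second = heapq.heappop(h)
--
--         heapq.heappush(h, first + (second * 2))
--
--         answer+=1
--
--     if h[0] < K:
--         return -1
--     return answer
-- ===== SOURCE B (Python) =====
-- def solution(scoville, K):
--     s = list(scoville)
--     answer = 0
--     while min(s) < K and len(s) > 1: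
--         first = min(s)
--         s.remove(first)
--         second = min(s)
--         s.remove(second)
--         s.append(first + 2 * second)
--         answer += 1
--     return -1 if min(s) < K else answer
-- ===== Notes on version B (the rewrite author's own statement) =====
-- stated objective: simpler
-- what changed: Replaces the heapq binary heap with a plain list that is repeatedly scanned: each round takes min(s), removes it, takes the new min, removes it, and appends first + 2*second — no heap, no import.
import Mathlib
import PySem

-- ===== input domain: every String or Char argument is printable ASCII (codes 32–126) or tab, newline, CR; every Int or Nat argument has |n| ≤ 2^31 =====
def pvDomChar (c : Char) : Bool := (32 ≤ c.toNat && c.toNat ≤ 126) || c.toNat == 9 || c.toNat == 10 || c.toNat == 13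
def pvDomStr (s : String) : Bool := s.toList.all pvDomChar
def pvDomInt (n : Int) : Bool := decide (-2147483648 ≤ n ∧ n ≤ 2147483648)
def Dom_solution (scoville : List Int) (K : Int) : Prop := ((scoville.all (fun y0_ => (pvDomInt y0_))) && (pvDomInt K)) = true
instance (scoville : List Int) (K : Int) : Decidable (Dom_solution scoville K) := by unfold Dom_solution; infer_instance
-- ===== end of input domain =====

-- B drops the heap: it keeps a plain list and repeatedly removes the two minima (simpler, no heapq); equal return value on every nonempty input.

-- ===== PORT A =====
-- heapq on a list of Ints is modelled by a sorted list: heappush = ordered insert,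
-- heappop = head/tail.  This is value-exact: only Int values are ever read from the
-- heap, and a binary min-heap and a sorted list pop the same values in the same order.
def pvHeapPush (h : List Int) (v : Int) : List Int := h.orderedInsert (· ≤ ·) v

def pvLoopA (h : List Int) (K ans : Int) : Int :=
  match h with
  | [] => -1                 -- unreachable under Pre_: Python raises IndexError at h[0]
  | [x] => if x < K then -1 else ans
  | x :: y :: t =>
      if x < K then pvLoopA (t.orderedInsert (· ≤ ·) (x + y * 2)) K (ans + 1)
      else ans
termination_by h.length
decreasing_by simp [List.orderedInsert_length]

def solution (scoville : List Int) (K : Int) : Int :=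
  pvLoopA (scoville.foldl pvHeapPush []) K 0

-- ===== PORT B =====
def pvLoopB (s : List Int) (K ans : Int) : Int :=
  match hm : PySem.List.min? s (fun v => v) with
  | none => -1               -- unreachable under Pre_: Python min([]) raises ValueError
  | some m =>
      if h1 : m < K ∧ 1 < s.length then
        let s1 := s.erase m                    -- s.remove(first): first occurrence
        match hm2 : PySem.List.min? s1 (fun v => v) with
        | none => -1                           -- unreachable: s1 ≠ [] since len(s) > 1
        | some m2 =>
            pvLoopB (s1.erase m2 ++ [m + 2 * m2]) K (ans + 1)
      else if m < K then -1 else ans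
termination_by s.length
decreasing_by
  have hms : m ∈ s := PySem.List.min?_mem hm
  have hm2s : m2 ∈ s.erase m := PySem.List.min?_mem hm2
  have h2 : (s.erase m).length = s.length - 1 := List.length_erase_of_mem hms
  have h3 : ((s.erase m).erase m2).length = (s.erase m).length - 1 :=
    List.length_erase_of_mem hm2s
  simp only [List.length_append, List.length_cons, List.length_nil, h3, h2]
  omega

def solution_alt (scoville : List Int) (K : Int) : Int :=
  pvLoopB scoville K 0

-- ===== PRECONDITION & SPEC =====
-- Pre_ excludes only the empty list, on which Python A raises IndexError (h[0]).
def Pre_solution (scoville : List Int) (K : Int) : Prop := scoville ≠ []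
instance (scoville : List Int) (K : Int) : Decidable (Pre_solution scoville K) := by
  unfold Pre_solution; infer_instance

def pvWitness_solution : List Int × Int := ([1, 2, 3, 9, 10, 12], 7)

def Spec_solution (scoville : List Int) (K : Int) (out : Int) : Prop := out = solution_alt scoville K
instance (scoville : List Int) (K : Int) (out : Int) : Decidable (Spec_solution scoville K out) := by unfold Spec_solution; infer_instance

-- ===== CLAIM (what is proved, stated in full; the proofs are below) =====
def Claim_equal_solution : Prop := ∀ (scoville : List Int) (K : Int), Dom_solution scoville K → Pre_solution scoville K → Spec_solution scoville K (solution scoville K)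

-- ===== LEMMAS AND PROOFS =====

-- The first minimum of any list permuting a sorted x :: t is x itself.
theorem pv_min?_of_sorted_perm {x : Int} {t s : List Int}
    (hsort : (x :: t).Pairwise (· ≤ ·)) (hp : (x :: t).Perm s) :
    PySem.List.min? s (fun v => v) = some x := by
  cases hms : PySem.List.min? s (fun v => v) with
  | none =>
      rw [PySem.List.min?_eq_none_iff] at hms
      subst hms
      exact absurd hp.symm (by simp)
  | some m =>
      have hmem : m ∈ x :: t := hp.symm.subset (PySem.List.min?_mem hms)
      have hxle : x ≤ m := by
        rcases List.mem_cons.mp hmem with h | h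
        · exact le_of_eq h.symm
        · exact List.rel_of_pairwise_cons hsort h
      have hmle : m ≤ x := PySem.List.min?_isMin hms x (hp.subset (by simp))
      exact congrArg some (le_antisymm hmle hxle)

-- Main loop invariant: A's sorted heap and B's bag hold the same multiset.
theorem pv_loop_eq (n : Nat) : ∀ (h s : List Int), h.length ≤ n →
    h.Pairwise (· ≤ ·) → h.Perm s → ∀ (K ans : Int), pvLoopA h K ans = pvLoopB s K ans := by
  induction n with
  | zero =>
      intro h s hlen _ hp K ans
      have h0 : h = [] := List.eq_nil_of_length_eq_zero (by omega)
      subst h0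
      have s0 : s = [] := hp.symm.eq_nil
      subst s0
      rw [pvLoopA, pvLoopB]
      simp [PySem.List.min?]
  | succ n ih =>
      intro h s hlen hsort hp K ans
      match h with
      | [] =>
          have s0 : s = [] := hp.symm.eq_nil
          subst s0
          rw [pvLoopA, pvLoopB]
          simp [PySem.List.min?]
      | [x] =>
          have s1 : s = [x] := List.perm_singleton.mp hp.symm
          subst s1
          rw [pvLoopA, pvLoopB]
          simp [PySem.List.min?]
      | x :: y :: t =>
          have hminS : PySem.List.min? s (fun v => v) = some x :=
            pv_min?_of_sorted_perm hsort hp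
          have hlenS : s.length = t.length + 2 := by
            rw [← hp.length_eq]; simp
          rw [pvLoopA, pvLoopB, hminS]
          by_cases hxK : x < K
          · have hcond : x < K ∧ 1 < s.length := ⟨hxK, by omega⟩
            simp only [hxK, if_true, hcond]
            -- B removes the first minimum: the residue permutes y :: t
            have hp1 : (y :: t).Perm (s.erase x) := by
              have := hp.erase x
              simpa using this
            have hsort1 : (y :: t).Pairwise (· ≤ ·) := hsort.of_cons
            have hmin1 : PySem.List.min? (s.erase x) (fun v => v) = some y :=
              pv_min?_of_sorted_perm hsort1 hp1
            rw [hmin1]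
            -- B removes the second minimum: the residue permutes t
            have hp2 : t.Perm ((s.erase x).erase y) := by
              have := hp1.erase y
              simpa using this
            -- new bags permute each other
            have hpnew : (t.orderedInsert (· ≤ ·) (x + y * 2)).Perm
                ((s.erase x).erase y ++ [x + 2 * y]) := by
              have h1 : (t.orderedInsert (· ≤ ·) (x + y * 2)).Perm ((x + y * 2) :: t) :=
                List.perm_orderedInsert _ _ _
              have h2 : ((s.erase x).erase y ++ [x + 2 * y]).Perm ((x + 2 * y) :: (s.erase x).erase y) :=
                List.perm_append_singleton _ _
              refine h1.trans (.trans ?_ h2.symm)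
              have hx2 : x + y * 2 = x + 2 * y := by ring
              rw [hx2]
              exact hp2.cons _
            have hsortnew : (t.orderedInsert (· ≤ ·) (x + y * 2)).Pairwise (· ≤ ·) :=
              List.Pairwise.orderedInsert _ _ ((hsort.of_cons).of_cons)
            have hlennew : (t.orderedInsert (· ≤ ·) (x + y * 2)).length ≤ n := by
              rw [List.orderedInsert_length]
              simp at hlen; omega
            exact ih _ _ hlennew hsortnew hpnew K (ans + 1)
          · have hcond : ¬ (x < K ∧ 1 < s.length) := by tauto
            simp [hxK]

-- Heapifying by repeated pushes yields a sorted permutation of acc ++ l.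
theorem pv_heapify (l : List Int) : ∀ (acc : List Int), acc.Pairwise (· ≤ ·) →
    (l.foldl pvHeapPush acc).Pairwise (· ≤ ·) ∧ (l.foldl pvHeapPush acc).Perm (acc ++ l) := by
  induction l with
  | nil => intro acc hs; simpa using hs
  | cons v l ih =>
      intro acc hs
      have hs' : (pvHeapPush acc v).Pairwise (· ≤ ·) :=
        List.Pairwise.orderedInsert _ _ hs
      obtain ⟨h1, h2⟩ := ih (pvHeapPush acc v) hs'
      refine ⟨by simp [pvHeapPush] at h1 ⊢; exact h1, ?_⟩
      have hstep : (pvHeapPush acc v).Perm (v :: acc) := List.perm_orderedInsert _ _ _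
      have hq1 : ((pvHeapPush acc v) ++ l).Perm ((v :: acc) ++ l) := hstep.append_right l
      have hq2 : (v :: (acc ++ l)).Perm (acc ++ v :: l) := List.perm_middle.symm
      simp only [List.foldl_cons]
      exact h2.trans (hq1.trans hq2)

-- ===== VERDICT (by name: the statement is the Claim_ definition above) =====
theorem solution_spec : Claim_equal_solution := by
  intro scoville K _ _
  unfold Spec_solution solution solution_alt
  obtain ⟨hsort, hperm⟩ := pv_heapify scoville [] List.Pairwise.nil
  exact pv_loop_eq (scoville.foldl pvHeapPush []).length _ _ le_rfl hsort
    hperm K 0
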